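-- pv_equiv track=rewrite | github.com/3-1415926/EPIJudge | epi_judge_python/bonus.py | calculate_bonus
-- ===== SOURCE A (Python) =====
-- from typing import List
--
-- def calculate_bonus(productivity: List[int]) -> int:
--     tickets = [1] * len(productivity)
--     for i in range(1, len(productivity)):
--         if productivity[i - 1] < productivity[i]:
--             tickets[i] = max(tickets[i], tickets[i - 1] + 1)
--     for i in range(len(productivity) - 2, -1, -1):
--         if productivity[i] > productivity[i + 1]:
--             tickets[i] = max(tickets[i], tickets[i + 1] + 1)
--     return sum(tickets)
-- ===== SOURCE B (Python) =====
-- from typing import List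
--
-- def calculate_bonus(productivity: List[int]) -> int:
--     # Single-pass slope counting: no tickets array, no backward pass.
--     if not productivity:
--         return 0
--     total = 1
--     up = down = peak = 0
--     for prev, cur in zip(productivity, productivity[1:]):
--         if prev < cur:
--             up += 1
--             down = 0
--             peak = up
--             total += 1 + up
--         elif prev == cur:
--             up = down = peak = 0
--             total += 1
--         else:
--             up = 0
--             down += 1
--             total += 1 + down - (1 if peak >= down else 0)
--     return total
-- ===== Notes on version B (the rewrite author's own statement) =====
-- stated objective: faster
-- what changed: Replaced the two-pass tickets-array algorithm with a single forward pass that keeps only up/down/peak run counters and a running total (O(1) extra space, no array, no backward pass).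
import Mathlib
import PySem

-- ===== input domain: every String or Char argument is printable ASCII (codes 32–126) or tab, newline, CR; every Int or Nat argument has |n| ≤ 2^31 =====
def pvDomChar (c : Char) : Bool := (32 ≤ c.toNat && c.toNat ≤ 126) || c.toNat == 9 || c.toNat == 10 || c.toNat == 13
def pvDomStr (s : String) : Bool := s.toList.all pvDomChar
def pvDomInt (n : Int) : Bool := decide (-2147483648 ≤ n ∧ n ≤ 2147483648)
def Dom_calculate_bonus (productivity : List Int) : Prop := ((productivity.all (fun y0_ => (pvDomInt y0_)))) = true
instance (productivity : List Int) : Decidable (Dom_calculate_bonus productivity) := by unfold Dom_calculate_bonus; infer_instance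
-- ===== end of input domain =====

-- B replaces A's two passes over a tickets array by one forward pass with O(1) counter state.
-- ===== PORT A =====
-- All list indices produced by the two range loops are in bounds, so `getD _ 0` is exact
-- for Python's `tickets[i]` / `productivity[i]` here.
def calculate_bonus (productivity : List Int) : Int :=
  let n := productivity.length
  let tickets : List Int := List.replicate n 1
  let tickets :=
    (List.range' 1 (n - 1)).foldl
      (fun t i =>
        if productivity.getD (i - 1) 0 < productivity.getD i 0 then
          t.set i (max (t.getD i 0) (t.getD (i - 1) 0 + 1))
        else t) tickets
  let tickets :=
    ((List.range (n - 1)).reverse).foldl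
      (fun t i =>
        if productivity.getD (i + 1) 0 < productivity.getD i 0 then
          t.set i (max (t.getD i 0) (t.getD (i + 1) 0 + 1))
        else t) tickets
  tickets.sum

-- ===== PORT B =====
-- state = (up, down, peak, total), exactly Source B's loop over zip(productivity, productivity[1:])
def pvStepB (st : Int × Int × Int × Int) (pc : Int × Int) : Int × Int × Int × Int :=
  let (up, down, peak, total) := st
  if pc.1 < pc.2 then (up + 1, 0, up + 1, total + 1 + (up + 1))
  else if pc.1 = pc.2 then (0, 0, 0, total + 1)
  else (0, down + 1, peak, total + 1 + (down + 1) - (if peak ≥ down + 1 then 1 else 0))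

def calculate_bonus_alt (productivity : List Int) : Int :=
  match productivity with
  | [] => 0
  | _ => ((productivity.zip productivity.tail).foldl pvStepB (0, 0, 0, 1)).2.2.2

-- ===== PRECONDITION & SPEC =====
def Spec_calculate_bonus (productivity : List Int) (out : Int) : Prop := out = calculate_bonus_alt productivity
instance (productivity : List Int) (out : Int) : Decidable (Spec_calculate_bonus productivity out) := by unfold Spec_calculate_bonus; infer_instance

-- ===== CLAIM (what is proved, stated in full; the proofs are below) =====
def Claim_equal_calculate_bonus : Prop := ∀ (productivity : List Int), Dom_calculate_bonus productivity → Spec_calculate_bonus productivity (calculate_bonus productivity)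

-- ===== LEMMAS AND PROOFS =====

-- `uu p i` = final ticket count forced by the increasing run ending at index i
def uu (p : List Int) : Nat → Int
  | 0 => 1
  | i + 1 => if p.getD i 0 < p.getD (i + 1) 0 then uu p i + 1 else 1

-- `dd p m j` = ticket count forced by the decreasing run starting at j, truncated at bound m
def dd (p : List Int) (m j : Nat) : Int :=
  if _h : j + 1 < m then (if p.getD (j + 1) 0 < p.getD j 0 then dd p m (j + 1) + 1 else 1) else 1
termination_by m - j
decreasing_by omega

-- `ss p m` = start index of the maximal strictly decreasing run ending at m
def ss (p : List Int) : Nat → Nat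
  | 0 => 0
  | m + 1 => if p.getD (m + 1) 0 < p.getD m 0 then ss p m else m + 1

-- reference value: sum of per-index maxima over prefix of length m
def RR (p : List Int) (m : Nat) : Int := ((List.range m).map (fun j => max (uu p j) (dd p m j))).sum

lemma uu_pos (p : List Int) (i : Nat) : 1 ≤ uu p i := by
  cases i with
  | zero => simp [uu]
  | succ i =>
      simp only [uu]
      split
      · have := uu_pos p i; omega
      · omega

lemma dd_boundary (p : List Int) (m j : Nat) (h : m ≤ j + 1) : dd p m j = 1 := by
  rw [dd]; simp [Nat.not_lt.mpr h]

lemma dd_step (p : List Int) (m j : Nat) (h : j + 1 < m) (hlt : p.getD (j + 1) 0 < p.getD j 0) :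
    dd p m j = dd p m (j + 1) + 1 := by
  rw [dd]; rw [dif_pos h, if_pos hlt]

lemma dd_flat (p : List Int) (m j : Nat) (h : j + 1 < m) (hlt : ¬ p.getD (j + 1) 0 < p.getD j 0) :
    dd p m j = 1 := by
  rw [dd]; rw [dif_pos h, if_neg hlt]

lemma dd_pos (p : List Int) (m j : Nat) : 1 ≤ dd p m j := by
  rw [dd]
  split
  · split
    · have := dd_pos p m (j + 1); omega
    · omega
  · omega
termination_by m - j
decreasing_by omega

lemma ss_le (p : List Int) (m : Nat) : ss p m ≤ m := by
  induction m with
  | zero => simp [ss]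
  | succ m ih => simp only [ss]; split <;> omega

lemma ss_run (p : List Int) (m : Nat) : ∀ j, ss p m ≤ j → j < m → p.getD (j + 1) 0 < p.getD j 0 := by
  induction m with
  | zero => omega
  | succ m ih =>
      intro j hj hjm
      simp only [ss] at hj
      split at hj
      · rcases Nat.lt_or_ge j m with h | h
        · exact ih j hj h
        · have : j = m := by omega
          subst this; assumption
      · omega

lemma ss_max (p : List Int) : ∀ m, 0 < ss p m → ¬ p.getD (ss p m) 0 < p.getD (ss p m - 1) 0 := by
  intro m
  induction m with
  | zero => intro h; simp [ss] at h
  | succ m ih =>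
      intro h
      by_cases hc : p.getD (m + 1) 0 < p.getD m 0
      · have e : ss p (m + 1) = ss p m := by simp only [ss]; rw [if_pos hc]
        rw [e] at h ⊢
        exact ih h
      · have e : ss p (m + 1) = m + 1 := by simp only [ss]; rw [if_neg hc]
        rw [e]
        simpa using hc

-- uu is 1 strictly inside a decreasing run
lemma uu_one_of_desc (p : List Int) (j : Nat) (h : p.getD (j + 1) 0 < p.getD j 0) :
    uu p (j + 1) = 1 := by
  simp only [uu]; split
  · omega
  · rfl

lemma uu_one_of_not_lt (p : List Int) (j : Nat) (h : ¬ p.getD j 0 < p.getD (j + 1) 0) :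
    uu p (j + 1) = 1 := by
  simp only [uu]; split
  · omega
  · rfl

-- inside the maximal decreasing run ending at m, dd with bound m+1 is the distance to the end
lemma dd_run_val (p : List Int) (m j : Nat) (hs : ss p m ≤ j) (hj : j ≤ m) :
    dd p (m + 1) j = ((m + 1 - j : Nat) : Int) := by
  rcases Nat.lt_or_ge j m with hlt | hge
  · have hstep := ss_run p m j hs hlt
    rw [dd_step p (m + 1) j (by omega) hstep,
        dd_run_val p m (j + 1) (by omega) (by omega)]
    push_cast
    omega
  · have hjm : j = m := by omega
    subst hjm
    rw [dd_boundary p (j + 1) j (by omega)]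
    simp
termination_by m - j
decreasing_by omega

-- extending the prefix by a non-descending element leaves all dd values unchanged
lemma dd_stable (p : List Int) (m : Nat) (hnd : ¬ p.getD (m + 1) 0 < p.getD m 0)
    (j : Nat) (hj : j ≤ m) : dd p (m + 2) j = dd p (m + 1) j := by
  rcases Nat.lt_or_ge (j + 1) (m + 1) with h | h
  · by_cases hlt : p.getD (j + 1) 0 < p.getD j 0
    · rw [dd_step p (m + 2) j (by omega) hlt, dd_step p (m + 1) j h hlt,
          dd_stable p m hnd (j + 1) (by omega)]
    · rw [dd_flat p (m + 2) j (by omega) hlt, dd_flat p (m + 1) j h hlt]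
  · have hjm : j = m := by omega
    subst hjm
    rw [dd_boundary p (j + 1) j (by omega), dd_flat p (j + 2) j (by omega) hnd]
termination_by m - j
decreasing_by omega

-- extending by a descending element adds 1 to dd exactly on the current maximal run [ss p m, m]
lemma dd_desc (p : List Int) (m : Nat) (hd : p.getD (m + 1) 0 < p.getD m 0)
    (j : Nat) (hj : j ≤ m) :
    dd p (m + 2) j = dd p (m + 1) j + (if ss p m ≤ j then 1 else 0) := by
  rcases Nat.lt_or_ge j m with hlt | hge
  · by_cases hstep : p.getD (j + 1) 0 < p.getD j 0
    · have hiff : ss p m ≤ j ↔ ss p m ≤ j + 1 := by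
        constructor
        · omega
        · intro h
          by_contra hnot
          have he : ss p m = j + 1 := by omega
          have hm := ss_max p m (by omega)
          rw [he] at hm
          simp only [Nat.add_sub_cancel] at hm
          exact absurd hstep hm
      rw [dd_step p (m + 2) j (by omega) hstep, dd_step p (m + 1) j (by omega) hstep,
          dd_desc p m hd (j + 1) (by omega)]
      by_cases hss : ss p m ≤ j
      · rw [if_pos hss, if_pos (hiff.mp hss)]
      · rw [if_neg hss, if_neg (fun h => hss (hiff.mpr h))]
        ring
    · have hout : ¬ ss p m ≤ j := by
        intro hss
        exact hstep (ss_run p m j hss hlt)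
      rw [dd_flat p (m + 2) j (by omega) hstep, dd_flat p (m + 1) j (by omega) hstep]
      rw [if_neg hout]
      ring
  · have hjm : j = m := by omega
    subst hjm
    have hss : ss p j ≤ j := ss_le p j
    rw [dd_step p (j + 2) j (by omega) hd, dd_boundary p (j + 2) (j + 1) (by omega),
        dd_boundary p (j + 1) j (by omega), if_pos hss]
termination_by m - j
decreasing_by omega

-- summing a pointwise-modified function: f below s, +c at s, +1 above s
lemma sum_add_ind (f g : Nat → Int) (c : Int) :
    ∀ (k s : Nat), s < k →
    (∀ j, j < s → g j = f j) → g s = f s + c → (∀ j, j < k → s < j → g j = f j + 1) →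
    ((List.range k).map g).sum = ((List.range k).map f).sum + c + ((k - 1 - s : Nat) : Int) := by
  intro k
  induction k with
  | zero => omega
  | succ k ih =>
      intro s hs h1 h2 h3
      rw [List.range_succ, List.map_append, List.map_append, List.sum_append, List.sum_append]
      rcases Nat.lt_or_ge s k with h | h
      · rw [ih s h h1 h2 (fun j hj hsj => h3 j (by omega) hsj)]
        have hk : g k = f k + 1 := h3 k (by omega) h
        simp only [List.map_cons, List.map_nil, List.sum_cons, List.sum_nil, hk]
        have : ((k + 1 - 1 - s : Nat) : Int) = ((k - 1 - s : Nat) : Int) + 1 := by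
          push_cast; omega
        rw [this]; ring
      · have hsk : s = k := by omega
        subst hsk
        have heq : ∀ j ∈ List.range s, g j = f j := by
          intro j hj; exact h1 j (List.mem_range.mp hj)
        rw [List.map_congr_left heq]
        simp only [List.map_cons, List.map_nil, List.sum_cons, List.sum_nil, h2]
        have : ((s + 1 - 1 - s : Nat) : Int) = 0 := by simp
        rw [this]; ring

-- congruence for RR-style sums
lemma sum_congr_range (f g : Nat → Int) (k : Nat) (h : ∀ j, j < k → g j = f j) :
    ((List.range k).map g).sum = ((List.range k).map f).sum := by
  apply congrArg
  exact List.map_congr_left (fun j hj => h j (List.mem_range.mp hj))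

lemma RR_succ (p : List Int) (m : Nat) :
    RR p (m + 1) = ((List.range m).map (fun j => max (uu p j) (dd p (m + 1) j))).sum
      + max (uu p m) (dd p (m + 1) m) := by
  simp [RR, List.range_succ]

-- ===== the B side =====

lemma zip_eq (p : List Int) :
    p.zip p.tail = (List.range (p.length - 1)).map (fun k => (p.getD k 0, p.getD (k + 1) 0)) := by
  apply List.ext_getElem
  · simp [List.length_zip, List.length_tail]
  · intro i h1 h2
    simp only [List.getElem_zip, List.getElem_map, List.getElem_range]
    have hlen : i + 1 < p.length := by
      simp [List.length_zip, List.length_tail] at h1; omega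
    rw [List.getElem_tail]
    rw [List.getD_eq_getElem p 0 (by omega), List.getD_eq_getElem p 0 hlen]

-- the single-pass invariant: after processing pairs 0..m-1 (prefix of length m+1)
lemma B_inv (p : List Int) (m : Nat) (hm : m + 1 ≤ p.length) :
    (List.range m).foldl (fun st k => pvStepB st (p.getD k 0, p.getD (k + 1) 0)) (0, 0, 0, 1)
      = (uu p m - 1, ((m - ss p m : Nat) : Int), uu p (ss p m) - 1, RR p (m + 1)) := by
  induction m with
  | zero =>
      have h0 : dd p 1 0 = 1 := dd_boundary p 1 0 (by omega)
      simp [RR, uu, ss, h0]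
  | succ m ih =>
      rw [List.range_succ, List.foldl_append, ih (by omega)]
      simp only [List.foldl_cons, List.foldl_nil]
      rcases lt_trichotomy (p.getD m 0) (p.getD (m + 1) 0) with hlt | heq | hgt
      · -- ascent
        have hnd : ¬ p.getD (m + 1) 0 < p.getD m 0 := by omega
        have huu : uu p (m + 1) = uu p m + 1 := by
          simp only [uu]; rw [if_pos hlt]
        have hss : ss p (m + 1) = m + 1 := by
          simp only [ss]; rw [if_neg hnd]
        have hRR : RR p (m + 2) = RR p (m + 1) + uu p (m + 1) := by
          rw [show m + 2 = (m + 1) + 1 from rfl, RR_succ]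
          rw [sum_congr_range (fun j => max (uu p j) (dd p (m + 1) j))
                (fun j => max (uu p j) (dd p (m + 2) j)) (m + 1)
                (fun j hj => by
                  show max (uu p j) (dd p (m + 2) j) = max (uu p j) (dd p (m + 1) j)
                  rw [dd_stable p m hnd j (by omega)])]
          rw [dd_boundary p (m + 2) (m + 1) (by omega), ← RR]
          have h1 := uu_pos p (m + 1)
          have h2 : max (uu p (m + 1)) 1 = uu p (m + 1) := by omega
          rw [h2]
        simp only [pvStepB]
        rw [if_pos hlt]
        simp only [Prod.mk.injEq]
        refine ⟨by rw [huu]; ring, by rw [hss]; simp, by rw [hss, huu]; ring, ?_⟩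
        rw [hRR, huu]; ring
      · -- plateau
        have hnd : ¬ p.getD (m + 1) 0 < p.getD m 0 := by omega
        have hnl : ¬ p.getD m 0 < p.getD (m + 1) 0 := by omega
        have huu : uu p (m + 1) = 1 := uu_one_of_not_lt p m hnl
        have hss : ss p (m + 1) = m + 1 := by
          simp only [ss]; rw [if_neg hnd]
        have hRR : RR p (m + 2) = RR p (m + 1) + 1 := by
          rw [show m + 2 = (m + 1) + 1 from rfl, RR_succ]
          rw [sum_congr_range (fun j => max (uu p j) (dd p (m + 1) j))
                (fun j => max (uu p j) (dd p (m + 2) j)) (m + 1)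
                (fun j hj => by
                  show max (uu p j) (dd p (m + 2) j) = max (uu p j) (dd p (m + 1) j)
                  rw [dd_stable p m hnd j (by omega)])]
          rw [dd_boundary p (m + 2) (m + 1) (by omega), ← RR, huu]
          simp
        simp only [pvStepB]
        rw [if_neg hnl, if_pos heq]
        simp only [Prod.mk.injEq]
        refine ⟨by rw [huu]; omega, by rw [hss]; simp, by rw [hss, huu]; omega, by rw [hRR]⟩
      · -- descent
        have hd : p.getD (m + 1) 0 < p.getD m 0 := hgt
        have hnl : ¬ p.getD m 0 < p.getD (m + 1) 0 := by omega
        have hne : ¬ p.getD m 0 = p.getD (m + 1) 0 := by omega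
        have huu : uu p (m + 1) = 1 := uu_one_of_not_lt p m hnl
        have hss : ss p (m + 1) = ss p m := by
          simp only [ss]; rw [if_pos hd]
        have hsle : ss p m ≤ m := ss_le p m
        have hddm : dd p (m + 1) (ss p m) = ((m + 1 - ss p m : Nat) : Int) :=
          dd_run_val p m (ss p m) le_rfl hsle
        have hRR : RR p (m + 2) = RR p (m + 1)
            + (if ((m - ss p m : Nat) : Int) + 2 ≤ uu p (ss p m) then 0 else 1)
            + ((m - ss p m : Nat) : Int) + 1 := by
          rw [show m + 2 = (m + 1) + 1 from rfl, RR_succ]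
          rw [dd_boundary p (m + 2) (m + 1) (by omega), huu]
          have hsum :
              ((List.range (m + 1)).map (fun j => max (uu p j) (dd p (m + 2) j))).sum
                = ((List.range (m + 1)).map (fun j => max (uu p j) (dd p (m + 1) j))).sum
                  + (if ((m - ss p m : Nat) : Int) + 2 ≤ uu p (ss p m) then 0 else 1)
                  + ((m + 1 - 1 - ss p m : Nat) : Int) := by
            apply sum_add_ind _ _ _ (m + 1) (ss p m) (by omega)
            · intro j hj
              have hout : ¬ ss p m ≤ j := by omega
              show max (uu p j) (dd p (m + 2) j) = max (uu p j) (dd p (m + 1) j)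
              rw [dd_desc p m hd j (by omega), if_neg hout]
              ring_nf
            · show max (uu p (ss p m)) (dd p (m + 2) (ss p m))
                = max (uu p (ss p m)) (dd p (m + 1) (ss p m))
                  + (if ((m - ss p m : Nat) : Int) + 2 ≤ uu p (ss p m) then 0 else 1)
              rw [dd_desc p m hd (ss p m) hsle, if_pos le_rfl, hddm]
              have h1 : ((m + 1 - ss p m : Nat) : Int) = ((m - ss p m : Nat) : Int) + 1 := by
                omega
              rw [h1]
              have h2 := uu_pos p (ss p m)
              split_ifs with hcc
              · omega
              · omega
            · intro j hj hsj
              have hrun : uu p j = 1 := by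
                have hj1 : ss p m ≤ j - 1 := by omega
                have hj2 : j - 1 < m := by omega
                have h3 := ss_run p m (j - 1) hj1 hj2
                cases j with
                | zero => omega
                | succ j' =>
                    exact uu_one_of_desc p j' (by simpa using h3)
              show max (uu p j) (dd p (m + 2) j)
                = max (uu p j) (dd p (m + 1) j) + 1
              rw [dd_desc p m hd j (by omega), if_pos (by omega), hrun]
              have hdj := dd_pos p (m + 1) j
              omega
          rw [hsum, ← RR]
          have h2 : ((m + 1 - 1 - ss p m : Nat) : Int) = ((m - ss p m : Nat) : Int) := by
            push_cast; omega
          rw [h2]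
          have h3 : max (1 : Int) 1 = 1 := by omega
          rw [h3]
        simp only [pvStepB]
        rw [if_neg hnl, if_neg hne]
        simp only [Prod.mk.injEq]
        refine ⟨by rw [huu]; omega, ?_, by rw [hss], ?_⟩
        · rw [hss]; omega
        · rw [hRR]
          split_ifs <;> omega

-- B computes RR
lemma B_eq_RR (p : List Int) (hp : p ≠ []) : calculate_bonus_alt p = RR p p.length := by
  have hn : 1 ≤ p.length := by
    cases p with
    | nil => simp at hp
    | cons a l => simp
  have hmain : ((p.zip p.tail).foldl pvStepB (0, 0, 0, 1)).2.2.2 = RR p p.length := by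
    rw [zip_eq, List.foldl_map]
    have := B_inv p (p.length - 1) (by omega)
    rw [this]
    have : p.length - 1 + 1 = p.length := by omega
    rw [this]
  cases p with
  | nil => simp at hp
  | cons a l =>
      simpa [calculate_bonus_alt] using hmain

-- ===== the A side =====

-- forward pass: after folding range' 1 k, entry j is uu for j ≤ k and 1 above
lemma fwd_inv (p : List Int) (k : Nat) (hk : k ≤ p.length - 1) :
    (List.range' 1 k).foldl
      (fun t i =>
        if p.getD (i - 1) 0 < p.getD i 0 then
          t.set i (max (t.getD i 0) (t.getD (i - 1) 0 + 1))
        else t) (List.replicate p.length 1)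
    = (List.range p.length).map (fun j => if j ≤ k then uu p j else 1) := by
  induction k with
  | zero =>
      apply List.ext_getElem
      · simp
      · intro i h1 h2
        simp only [List.getElem_map, List.getElem_range]
        cases i with
        | zero => simp [uu]
        | succ i => simp
  | succ k ih =>
      rw [List.range'_1_concat, List.foldl_append, ih (by omega)]
      simp only [List.foldl_cons, List.foldl_nil]
      have e1 : 1 + k = k + 1 := by omega
      rw [e1]
      simp only [Nat.add_sub_cancel]
      have hk1 : k + 1 < p.length := by omega
      have hgd : ∀ j v, j < p.length →
          ((List.range p.length).map (fun j => if j ≤ k then uu p j else 1)).getD j v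
            = if j ≤ k then uu p j else 1 := by
        intro j v hj
        rw [List.getD_eq_getElem _ v (by simpa using hj)]
        simp
      have g1 : ((List.range p.length).map (fun j => if j ≤ k then uu p j else 1)).getD (k + 1) 0
          = 1 := by
        rw [hgd _ _ hk1, if_neg (by omega)]
      have g0 : ((List.range p.length).map (fun j => if j ≤ k then uu p j else 1)).getD k 0
          = uu p k := by
        rw [hgd _ _ (by omega), if_pos le_rfl]
      by_cases hlt : p.getD k 0 < p.getD (k + 1) 0
      · rw [if_pos hlt]
        apply List.ext_getElem
        · simp
        · intro i h1 h2
          have h2' : i < p.length := by simpa using h2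
          simp only [List.getElem_set, List.getElem_map, List.getElem_range]
          by_cases hik : k + 1 = i
          · rw [if_pos hik]
            subst hik
            rw [g0, g1, if_pos le_rfl]
            have huu : uu p (k + 1) = uu p k + 1 := by
              simp only [uu]; rw [if_pos hlt]
            rw [huu]
            have := uu_pos p k
            omega
          · rw [if_neg hik]
            by_cases hki : i ≤ k
            · rw [if_pos hki, if_pos (by omega)]
            · rw [if_neg hki, if_neg (by omega)]
      · rw [if_neg hlt]
        apply List.map_congr_left
        intro j hj
        by_cases hjk : j ≤ k
        · rw [if_pos hjk, if_pos (by omega)]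
        · by_cases hjk1 : j ≤ k + 1
          · have hj1 : j = k + 1 := by omega
            subst hj1
            rw [if_neg hjk, if_pos (by omega), uu_one_of_not_lt p k hlt]
          · rw [if_neg hjk, if_neg hjk1]

-- backward pass: folding indices p.length-2 .. k onto the uu list gives max(uu, dd) from k up
lemma bwd_inv (p : List Int) (c k : Nat) (hkc : k + c = p.length - 1) (hp : 1 ≤ p.length) :
    ((List.range' k c).reverse).foldl
      (fun t i =>
        if p.getD (i + 1) 0 < p.getD i 0 then
          t.set i (max (t.getD i 0) (t.getD (i + 1) 0 + 1))
        else t)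
      ((List.range p.length).map (uu p))
    = (List.range p.length).map
        (fun j => if k ≤ j then max (uu p j) (dd p p.length j) else uu p j) := by
  induction c generalizing k with
  | zero =>
      simp only [List.range'_zero, List.reverse_nil, List.foldl_nil]
      apply List.map_congr_left
      intro j hj
      have hj' : j < p.length := List.mem_range.mp hj
      by_cases hkj : k ≤ j
      · rw [if_pos hkj]
        have hjb : p.length ≤ j + 1 := by omega
        rw [dd_boundary p p.length j hjb]
        have := uu_pos p j
        omega
      · rw [if_neg hkj]
  | succ c ih =>
      rw [List.range'_succ, List.reverse_cons, List.foldl_append, ih (k + 1) (by omega)]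
      simp only [List.foldl_cons, List.foldl_nil]
      have hk1 : k + 1 < p.length := by omega
      have hgd : ∀ j v, j < p.length →
          ((List.range p.length).map
            (fun j => if k + 1 ≤ j then max (uu p j) (dd p p.length j) else uu p j)).getD j v
            = if k + 1 ≤ j then max (uu p j) (dd p p.length j) else uu p j := by
        intro j v hj
        rw [List.getD_eq_getElem _ v (by simpa using hj)]
        simp
      have g1 : ((List.range p.length).map
            (fun j => if k + 1 ≤ j then max (uu p j) (dd p p.length j) else uu p j)).getD (k + 1) 0
          = max (uu p (k + 1)) (dd p p.length (k + 1)) := by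
        rw [hgd _ _ hk1, if_pos le_rfl]
      have g0 : ((List.range p.length).map
            (fun j => if k + 1 ≤ j then max (uu p j) (dd p p.length j) else uu p j)).getD k 0
          = uu p k := by
        rw [hgd _ _ (by omega), if_neg (by omega)]
      by_cases hlt : p.getD (k + 1) 0 < p.getD k 0
      · rw [if_pos hlt]
        apply List.ext_getElem
        · simp
        · intro i h1 h2
          have h2' : i < p.length := by simpa using h2
          simp only [List.getElem_set, List.getElem_map, List.getElem_range]
          by_cases hik : k = i
          · rw [if_pos hik]
            subst hik
            rw [g0, g1, if_pos le_rfl]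
            have hdd : dd p p.length k = dd p p.length (k + 1) + 1 :=
              dd_step p p.length k hk1 hlt
            have huu1 : uu p (k + 1) = 1 := uu_one_of_desc p k hlt
            rw [huu1, hdd]
            have := dd_pos p p.length (k + 1)
            omega
          · rw [if_neg hik]
            by_cases hki : k ≤ i
            · rw [if_pos (by omega), if_pos hki]
            · rw [if_neg (by omega), if_neg hki]
      · rw [if_neg hlt]
        apply List.map_congr_left
        intro j hj
        have hj' : j < p.length := List.mem_range.mp hj
        by_cases hjk : k + 1 ≤ j
        · rw [if_pos hjk, if_pos (by omega)]
        · by_cases hjk0 : k ≤ j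
          · have : j = k := by omega
            subst this
            rw [if_neg hjk, if_pos le_rfl]
            rw [dd_flat p p.length j hk1 hlt]
            have := uu_pos p j
            omega
          · rw [if_neg hjk, if_neg hjk0]

-- A computes RR
lemma A_eq_RR (p : List Int) : calculate_bonus p = RR p p.length := by
  rcases Nat.eq_zero_or_pos p.length with h0 | h1
  · have : p = [] := List.length_eq_zero_iff.mp h0
    subst this
    simp [calculate_bonus, RR]
  · unfold calculate_bonus
    simp only
    rw [fwd_inv p (p.length - 1) le_rfl]
    have hmap : (List.range p.length).map (fun j => if j ≤ p.length - 1 then uu p j else 1)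
        = (List.range p.length).map (uu p) := by
      apply List.map_congr_left
      intro j hj
      rw [if_pos (by have := List.mem_range.mp hj; omega)]
    rw [hmap]
    have hbwd := bwd_inv p (p.length - 1) 0 (by omega) h1
    simp only [List.range_eq_range'] at hbwd ⊢
    rw [hbwd]
    unfold RR
    apply congrArg
    simp only [List.range_eq_range']
    apply List.map_congr_left
    intro j hj
    rw [if_pos (Nat.zero_le j)]

-- ===== VERDICT (by name: the statement is the Claim_ definition above) =====
theorem calculate_bonus_spec : Claim_equal_calculate_bonus := by
  intro p _
  unfold Spec_calculate_bonus
  rcases eq_or_ne p [] with h | h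
  · subst h; simp [calculate_bonus, calculate_bonus_alt]
  · rw [A_eq_RR p, B_eq_RR p h]
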